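-- pv_equiv track=rewrite | github.com/longhorn396/code-golf | pig_latin.py | full_translation
-- ===== SOURCE A (Python) =====
-- from string import punctuation
--
-- def full_translation(english):
--     """More advanced and correct translation"""
--     # TODO: go from full pl back to english
--     words = english.lower().split()
--     vowels = "AaEeIiOoUu"
--     ending_punct = ".?!"
--     pig_latin = []
--     cap_next = True
--     for word in words:
--         if word[0] in vowels:
--             if word[-1] in punctuation:
--                 plw = word[:len(word) - 1] + "way" + word[-1]
--             else:
--                 plw = word + "way"
--         else:
--             plw = ""
--             for char in word:
--                 if char not in vowels:
--                     plw += char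
--                 else:
--                     if word[-1] in punctuation:
--                         plw = word[word.index(char):len(word) - 1] + plw + "ay" + word[-1]
--                     else:
--                         plw = word[word.index(char):] + plw + "ay"
--                     break
--         if cap_next:
--             plw = plw[0].upper() + plw[1:]
--             cap_next = False
--         cap_next = plw[-1] in ending_punct
--         pig_latin += [plw]
--     return " ".join(pig_latin)
-- ===== SOURCE B (Python) =====
-- from string import punctuation
--
-- VOWELS = "AaEeIiOoUu"
--
--
-- def _pig_word(word):
--     """Translate one (lowercased, nonempty) word by splitting at the first vowel."""
--     i = next((k for k, c in enumerate(word) if c in VOWELS), None)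
--     if i is None:
--         return word
--     if i == 0:
--         if word[-1] in punctuation:
--             return word[:-1] + "way" + word[-1]
--         return word + "way"
--     pre, rest = word[:i], word[i:]
--     if word[-1] in punctuation:
--         return rest[:-1] + pre + "ay" + rest[-1]
--     return rest + pre + "ay"
--
--
-- def full_translation(english):
--     """More advanced and correct translation"""
--     out = []
--     cap = True
--     for word in english.lower().split():
--         plw = _pig_word(word)
--         if cap:
--             plw = plw[0].upper() + plw[1:]
--         cap = plw[-1] in ".?!"
--         out.append(plw)
--     return " ".join(out)
-- ===== Notes on version B (the rewrite author's own statement) =====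
-- stated objective: idiomatic
-- what changed: Each word is translated by locating the first vowel index once and splitting with slices, replacing A's character-accumulation loop that re-scans the word with list.index to rebuild the result at the break.
import Mathlib
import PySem

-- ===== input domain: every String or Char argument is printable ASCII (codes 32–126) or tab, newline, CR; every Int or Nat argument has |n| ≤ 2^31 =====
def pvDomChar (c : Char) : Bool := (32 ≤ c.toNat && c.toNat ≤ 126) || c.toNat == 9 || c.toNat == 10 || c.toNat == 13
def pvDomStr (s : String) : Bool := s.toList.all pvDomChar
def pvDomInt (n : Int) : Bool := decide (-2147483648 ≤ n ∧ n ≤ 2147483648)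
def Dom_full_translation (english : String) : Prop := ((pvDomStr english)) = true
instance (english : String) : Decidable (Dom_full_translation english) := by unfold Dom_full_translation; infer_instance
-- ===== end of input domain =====

-- B replaces A's char-by-char consonant-accumulation loop (with its list.index re-scan)
-- by a direct split of each word at its first vowel index; objective: idiomatic decomposition.


-- ===== PORT A =====
def pvVowels : List Char := "AaEeIiOoUu".toList
-- string.punctuation
def pvPunct : List Char := "!\"#$%&'()*+,-./:;<=>?@[\\]^_`{|}~".toList
def pvEndPunct : List Char := ".?!".toList

-- A's inner 'for char in word' loop: accumulate consonants into plw, break at the first vowel.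
-- word[-1] is ported as getLastD ' ' (words produced by split() are nonempty, so no IndexError).
def pvInnerA (word : List Char) : List Char → List Char → List Char
  | [], plw => plw
  | c :: cs, plw =>
    if pvVowels.contains c = false then
      pvInnerA word cs (plw ++ [c])
    else
      match PySem.List.index? word c with   -- word.index(char)
      | some i =>
          if pvPunct.contains (word.getLastD ' ') then
            PySem.List.slice word (some (i : Int)) (some ((word.length : Int) - 1))
              ++ plw ++ "ay".toList ++ [word.getLastD ' ']
          else
            PySem.List.slice word (some (i : Int)) none ++ plw ++ "ay".toList
      | none => plw   -- unreachable: char ∈ word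

-- one word's translation in A
def pvTransA (word : List Char) : List Char :=
  match word with
  | [] => []   -- unreachable: split() yields nonempty words
  | c0 :: _ =>
    if pvVowels.contains c0 then
      if pvPunct.contains (word.getLastD ' ') then
        PySem.List.slice word none (some ((word.length : Int) - 1))
          ++ "way".toList ++ [word.getLastD ' ']
      else word ++ "way".toList
    else pvInnerA word word []

-- plw[0].upper() + plw[1:] (plw is nonempty)
def pvCapFirst (plw : List Char) : List Char :=
  match plw with
  | [] => []   -- unreachable
  | c :: cs => PySem.Chars.upperChar c :: cs

-- A's main loop: accumulator list of translated words plus cap_next flag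
def pvLoopA : List (List Char) → List (List Char) × Bool → List (List Char) × Bool
  | [], st => st
  | w :: ws, (acc, capNext) =>
    let plw0 := pvTransA w
    let plw := if capNext then pvCapFirst plw0 else plw0
    pvLoopA ws (acc ++ [plw], pvEndPunct.contains (plw.getLastD ' '))

def full_translation (english : String) : String :=
  String.ofList (PySem.Chars.join [' ']
    ((pvLoopA (PySem.Chars.split₀ (PySem.Chars.lower english.toList)) ([], true)).1))

-- ===== PORT B =====
-- B's per-word translation: split the word at the index of its first vowel.
def pvPigWordB (word : List Char) : List Char :=
  match word.findIdx? (fun c => pvVowels.contains c) with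
  | none => word
  | some 0 =>
      if pvPunct.contains (word.getLastD ' ') then
        word.dropLast ++ "way".toList ++ [word.getLastD ' ']
      else word ++ "way".toList
  | some i =>
      let pre := word.take i
      let rest := word.drop i
      if pvPunct.contains (word.getLastD ' ') then
        rest.dropLast ++ pre ++ "ay".toList ++ [rest.getLastD ' ']
      else rest ++ pre ++ "ay".toList

-- B's sentence loop, consing directly with the cap flag threaded through
def pvLoopB (cap : Bool) : List (List Char) → List (List Char)
  | [] => []
  | w :: ws =>
    let plw0 := pvPigWordB w
    let plw := if cap then pvCapFirst plw0 else plw0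
    plw :: pvLoopB (pvEndPunct.contains (plw.getLastD ' ')) ws

def full_translation_alt (english : String) : String :=
  String.ofList (PySem.Chars.join [' ']
    (pvLoopB true (PySem.Chars.split₀ (PySem.Chars.lower english.toList))))

-- ===== PRECONDITION & SPEC =====
def Spec_full_translation (english : String) (out : String) : Prop := out = full_translation_alt english
instance (english : String) (out : String) : Decidable (Spec_full_translation english out) := by unfold Spec_full_translation; infer_instance

-- ===== CLAIM (what is proved, stated in full; the proofs are below) =====
def Claim_equal_full_translation : Prop := ∀ (english : String), Dom_full_translation english → Spec_full_translation english (full_translation english)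

-- ===== LEMMAS AND PROOFS =====

-- proof helper: the common shape of both per-word results when the first vowel sits at index i
def pvBuild (w : List Char) (i : Nat) : List Char :=
  if pvPunct.contains (w.getLastD ' ') then
    (w.drop i).dropLast ++ w.take i ++ "ay".toList ++ [(w.drop i).getLastD ' ']
  else w.drop i ++ w.take i ++ "ay".toList

theorem pvIdx_first (pre cs : List Char) (c : Char) (h : c ∉ pre) :
    PySem.List.index? (pre ++ c :: cs) c = some pre.length := by
  induction pre with
  | nil => simp [PySem.List.index?, List.idxOf?_cons]
  | cons a t ih =>
      simp only [List.mem_cons, not_or] at h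
      have hne : (a == c) = false := by
        simp only [beq_eq_false_iff_ne]; exact fun e => h.1 e.symm
      have ht := ih h.2
      simp only [PySem.List.index?] at ht ⊢
      simp [List.idxOf?_cons, hne, ht]

theorem pvGetLastD_drop (xs : List Char) (k : Nat) (h : k < xs.length) (d : Char) :
    (xs.drop k).getLastD d = xs.getLastD d := by
  rw [List.getLastD_eq_getLast?, List.getLastD_eq_getLast?, List.getLast?_drop]
  simp [Nat.not_le.mpr h]

theorem pvSlice_from_eq (w : List Char) (i : Nat) :
    PySem.List.slice w (some (i : Int)) none = w.drop i := by
  exact PySem.List.slice_from_natCast w i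

theorem pvSlice_mid_eq (w : List Char) (i : Nat) (hw : w ≠ []) :
    PySem.List.slice w (some (i : Int)) (some ((w.length : Int) - 1)) = (w.drop i).dropLast := by
  have h1 : ((w.length : Int) - 1) = ((w.length - 1 : Nat) : Int) := by
    have : 1 ≤ w.length := List.length_pos_of_ne_nil hw
    omega
  rw [h1, PySem.List.slice_natCast, List.dropLast_eq_take]
  congr 1
  simp [List.length_drop]
  omega

theorem pvInnerA_eq (pre rest : List Char) (hpre : ∀ c ∈ pre, pvVowels.contains c = false) :
    pvInnerA (pre ++ rest) rest pre =
      match rest.findIdx? (fun c => pvVowels.contains c) with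
      | none => pre ++ rest
      | some j => pvBuild (pre ++ rest) (pre.length + j) := by
  induction rest generalizing pre with
  | nil => simp [pvInnerA, List.findIdx?_nil]
  | cons c cs ih =>
      by_cases hc : pvVowels.contains c = true
      · -- first vowel found here
        have hnotin : c ∉ pre := by
          intro hmem
          have h1 := hpre c hmem
          rw [h1] at hc
          cases hc
        have hcm : c ∈ pvVowels := by simpa using hc
        have hidx := pvIdx_first pre cs c hnotin
        have hne : (pre ++ c :: cs) ≠ [] := by simp
        have hfi : (c :: cs).findIdx? (fun c => pvVowels.contains c) = some 0 := by
          simp [List.findIdx?_cons, hcm]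
        have htake : (pre ++ c :: cs).take pre.length = pre := by
          rw [List.take_left']
          rfl
        have hlast : ((pre ++ c :: cs).drop pre.length).getLastD ' ' = (pre ++ c :: cs).getLastD ' ' := by
          apply pvGetLastD_drop; simp
        simp only [hfi]
        simp only [pvInnerA]
        rw [if_neg (by simp [hcm]), hidx]
        dsimp only
        unfold pvBuild
        simp only [Nat.add_zero]
        rw [pvSlice_from_eq, pvSlice_mid_eq _ _ hne, htake, hlast]
      · -- consonant: accumulate and recurse
        have hc' : pvVowels.contains c = false := by simpa using hc
        have hpre' : ∀ d ∈ pre ++ [c], pvVowels.contains d = false := by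
          intro d hd
          rcases List.mem_append.mp hd with h1 | h1
          · exact hpre d h1
          · simp only [List.mem_singleton] at h1; subst h1; exact hc'
        have ihs := ih (pre ++ [c]) hpre'
        simp only [List.append_assoc, List.singleton_append] at ihs
        simp only [pvInnerA]
        rw [if_pos hc', ihs]
        simp only [List.findIdx?_cons, hc']
        cases hfi : cs.findIdx? (fun c => pvVowels.contains c) with
        | none => simp
        | some j =>
            simp only [Option.map_some, Bool.false_eq_true, if_false]
            have hlen : (pre ++ [c]).length + j = pre.length + (j + 1) := by
              simp [List.length_append]
              omega
            rw [hlen]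

theorem pvTransA_eq_pvPigWordB (w : List Char) : pvTransA w = pvPigWordB w := by
  cases w with
  | nil => simp [pvTransA, pvPigWordB, List.findIdx?_nil]
  | cons c0 t =>
      by_cases hc : pvVowels.contains c0 = true
      · -- vowel start
        have hcm : c0 ∈ pvVowels := by simpa using hc
        have hfi : (c0 :: t).findIdx? (fun c => pvVowels.contains c) = some 0 := by
          simp [List.findIdx?_cons, hcm]
        have hsl : PySem.List.slice (c0 :: t) none (some (((c0 :: t).length : Int) - 1))
            = (c0 :: t).dropLast := by
          have h1 : (((c0 :: t).length : Int) - 1) = (((c0 :: t).length - 1 : Nat) : Int) := by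
            simp
          rw [h1, PySem.List.slice_to _ (by positivity), List.dropLast_eq_take]
          simp
        simp only [pvTransA, pvPigWordB, hfi]
        rw [if_pos hc, hsl]
      · have hc' : pvVowels.contains c0 = false := by simpa using hc
        have hin := pvInnerA_eq [] (c0 :: t) (by simp)
        simp only [List.nil_append, List.length_nil, Nat.zero_add] at hin
        simp only [pvTransA]
        rw [if_neg (by rw [hc']; exact Bool.false_ne_true), hin]
        simp only [pvPigWordB, List.findIdx?_cons, hc', Bool.false_eq_true, if_false]
        cases hfi : t.findIdx? (fun c => pvVowels.contains c) with
        | none => simp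
        | some j =>
            simp only [Option.map_some]
            unfold pvBuild
            rfl

theorem pvLoopA_eq (ws : List (List Char)) (acc : List (List Char)) (cap : Bool) :
    (pvLoopA ws (acc, cap)).1 = acc ++ pvLoopB cap ws := by
  induction ws generalizing acc cap with
  | nil => simp [pvLoopA, pvLoopB]
  | cons w ws ih =>
      simp only [pvLoopA, pvLoopB, pvTransA_eq_pvPigWordB]
      rw [ih]
      simp

-- ===== VERDICT (by name: the statement is the Claim_ definition above) =====
theorem full_translation_spec : Claim_equal_full_translation := by
  intro english _
  unfold Spec_full_translation full_translation full_translation_alt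
  rw [pvLoopA_eq]
  simp
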